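-- pv_equiv track=rewrite | github.com/Atharva3131/Indie-scheme-dbhack1 | services/eligibility.py | check_occupation_eligibility
-- ===== SOURCE A (Python) =====
-- from typing import List, Optional, Tuple
--
-- def check_occupation_eligibility(user_occupation: str, occupation_criteria: str) -> Tuple[bool, str]:
--     """
--     Check if user occupation meets the scheme's occupation criteria.
--
--     Args:
--         user_occupation: User's occupation
--         occupation_criteria: Scheme's occupation criteria string
--
--     Returns:
--         Tuple of (is_eligible, reason)
--     """
--     occupation_criteria = occupation_criteria.strip().lower()
--     user_occupation = user_occupation.strip().lower()
--
--     if occupation_criteria in ['all', 'any', 'no restriction']: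
--         return True, f"occupation {user_occupation} meets criteria (open to all occupations)"
--
--     # Check for direct match
--     if user_occupation == occupation_criteria:
--         return True, f"occupation {user_occupation} matches required occupation"
--
--     # Check for partial matches and synonyms
--     occupation_synonyms = {
--         'student': ['student', 'pupil', 'learner'],
--         'farmer': ['farmer', 'agriculturist', 'cultivator'],
--         'unemployed': ['unemployed', 'jobless', 'seeking employment'],
--         'self-employed': ['self-employed', 'entrepreneur', 'business owner'],
--         'employed': ['employed', 'working', 'job holder']
--     }
--
--     for key, synonyms in occupation_synonyms.items():
--         if occupation_criteria == key and user_occupation in synonyms: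
--             return True, f"occupation {user_occupation} matches {key} criteria"
--         if user_occupation == key and occupation_criteria in synonyms:
--             return True, f"occupation {user_occupation} matches {occupation_criteria} criteria"
--
--     return False, f"occupation {user_occupation} does not match required occupation: {occupation_criteria}"
-- ===== SOURCE B (Python) =====
-- _OCCUPATION_SYNONYMS = {
--     'student': ['student', 'pupil', 'learner'],
--     'farmer': ['farmer', 'agriculturist', 'cultivator'],
--     'unemployed': ['unemployed', 'jobless', 'seeking employment'],
--     'self-employed': ['self-employed', 'entrepreneur', 'business owner'],
--     'employed': ['employed', 'working', 'job holder'],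
-- }
-- # flat reverse index: synonym -> canonical key (synonyms are unique across keys)
-- _CANONICAL = {syn: key for key, syns in _OCCUPATION_SYNONYMS.items() for syn in syns}
--
-- def check_occupation_eligibility(user_occupation: str, occupation_criteria: str):
--     occupation_criteria = occupation_criteria.strip().lower()
--     user_occupation = user_occupation.strip().lower()
--
--     if occupation_criteria in ('all', 'any', 'no restriction'):
--         return True, f"occupation {user_occupation} meets criteria (open to all occupations)"
--
--     if user_occupation == occupation_criteria:
--         return True, f"occupation {user_occupation} matches required occupation"
--
--     # two hashed lookups instead of a scan over every key's synonym list
--     if _CANONICAL.get(user_occupation) == occupation_criteria or \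
--        _CANONICAL.get(occupation_criteria) == user_occupation:
--         return True, f"occupation {user_occupation} matches {occupation_criteria} criteria"
--
--     return False, f"occupation {user_occupation} does not match required occupation: {occupation_criteria}"
-- ===== Notes on version B (the rewrite author's own statement) =====
-- stated objective: simpler
-- what changed: Replaces the loop over the synonym dictionary (with two membership scans per key) by a module-level flat reverse index synonym->canonical key, so the synonym check becomes two constant-time dict lookups and one return branch.
import Mathlib
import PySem

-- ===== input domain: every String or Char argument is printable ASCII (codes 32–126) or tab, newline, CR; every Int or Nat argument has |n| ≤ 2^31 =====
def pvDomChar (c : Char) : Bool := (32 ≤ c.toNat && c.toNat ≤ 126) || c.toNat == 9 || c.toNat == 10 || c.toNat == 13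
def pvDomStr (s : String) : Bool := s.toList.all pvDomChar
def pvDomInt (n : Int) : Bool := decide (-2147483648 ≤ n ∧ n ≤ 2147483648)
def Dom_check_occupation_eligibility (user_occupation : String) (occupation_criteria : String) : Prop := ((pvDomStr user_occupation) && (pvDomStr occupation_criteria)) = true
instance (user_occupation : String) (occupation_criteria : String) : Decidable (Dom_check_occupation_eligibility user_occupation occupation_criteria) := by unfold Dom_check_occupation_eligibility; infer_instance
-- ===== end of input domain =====

-- B replaces A's scan over the synonym dictionary by a precomputed flat reverse index
-- (synonym -> canonical key) and two lookups; objective: simpler.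

-- ===== PORT A =====
def occupationSynonyms : List (String × List String) :=
  [("student", ["student", "pupil", "learner"]),
   ("farmer", ["farmer", "agriculturist", "cultivator"]),
   ("unemployed", ["unemployed", "jobless", "seeking employment"]),
   ("self-employed", ["self-employed", "entrepreneur", "business owner"]),
   ("employed", ["employed", "working", "job holder"])]

-- the 'for key, synonyms in occupation_synonyms.items()' loop of A
def synLoop (user_occupation occupation_criteria : String) : List (String × List String) → Bool × String
  | [] => (false, "occupation " ++ user_occupation ++ " does not match required occupation: " ++ occupation_criteria)
  | (key, synonyms) :: rest =>
    if occupation_criteria = key ∧ user_occupation ∈ synonyms then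
      (true, "occupation " ++ user_occupation ++ " matches " ++ key ++ " criteria")
    else if user_occupation = key ∧ occupation_criteria ∈ synonyms then
      (true, "occupation " ++ user_occupation ++ " matches " ++ occupation_criteria ++ " criteria")
    else synLoop user_occupation occupation_criteria rest

def check_occupation_eligibility (user_occupation : String) (occupation_criteria : String) : Bool × String :=
  let occupation_criteria := PySem.Str.lower (PySem.Str.strip occupation_criteria)
  let user_occupation := PySem.Str.lower (PySem.Str.strip user_occupation)
  if occupation_criteria ∈ ["all", "any", "no restriction"] then
    (true, "occupation " ++ user_occupation ++ " meets criteria (open to all occupations)")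
  else if user_occupation = occupation_criteria then
    (true, "occupation " ++ user_occupation ++ " matches required occupation")
  else synLoop user_occupation occupation_criteria occupationSynonyms

-- ===== PORT B =====
-- flat reverse index: synonym -> canonical key (the dict comprehension of Source B)
def canonicalIndex : PySem.Dict String String :=
  PySem.Dict.ofList (occupationSynonyms.flatMap (fun p => p.2.map (fun s => (s, p.1))))

def check_occupation_eligibility_alt (user_occupation : String) (occupation_criteria : String) : Bool × String :=
  let occupation_criteria := PySem.Str.lower (PySem.Str.strip occupation_criteria)
  let user_occupation := PySem.Str.lower (PySem.Str.strip user_occupation)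
  if occupation_criteria ∈ ["all", "any", "no restriction"] then
    (true, "occupation " ++ user_occupation ++ " meets criteria (open to all occupations)")
  else if user_occupation = occupation_criteria then
    (true, "occupation " ++ user_occupation ++ " matches required occupation")
  else if canonicalIndex.get? user_occupation = some occupation_criteria ∨
          canonicalIndex.get? occupation_criteria = some user_occupation then
    (true, "occupation " ++ user_occupation ++ " matches " ++ occupation_criteria ++ " criteria")
  else
    (false, "occupation " ++ user_occupation ++ " does not match required occupation: " ++ occupation_criteria)

-- ===== PRECONDITION & SPEC =====
def Spec_check_occupation_eligibility (user_occupation : String) (occupation_criteria : String) (out : Bool × String) : Prop := out = check_occupation_eligibility_alt user_occupation occupation_criteria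
instance (user_occupation : String) (occupation_criteria : String) (out : Bool × String) : Decidable (Spec_check_occupation_eligibility user_occupation occupation_criteria out) := by unfold Spec_check_occupation_eligibility; infer_instance

-- ===== CLAIM (what is proved, stated in full; the proofs are below) =====
def Claim_equal_check_occupation_eligibility : Prop := ∀ (user_occupation : String) (occupation_criteria : String), Dom_check_occupation_eligibility user_occupation occupation_criteria → Spec_check_occupation_eligibility user_occupation occupation_criteria (check_occupation_eligibility user_occupation occupation_criteria)

-- ===== LEMMAS AND PROOFS =====

set_option maxHeartbeats 1000000

def allSyn : List String :=
  ["student", "pupil", "learner", "farmer", "agriculturist", "cultivator", "unemployed", "jobless", "seeking employment", "self-employed", "entrepreneur", "business owner", "employed", "working", "job holder"]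

theorem get?_mk_nil_str (x : String) : (PySem.Dict.mk ([] : List (String × String))).get? x = none := by
  simp [PySem.Dict.get?]

theorem canonicalIndex_mk : canonicalIndex = PySem.Dict.mk
    [("student", "student"), ("pupil", "student"), ("learner", "student"), ("farmer", "farmer"), ("agriculturist", "farmer"), ("cultivator", "farmer"), ("unemployed", "unemployed"), ("jobless", "unemployed"), ("seeking employment", "unemployed"), ("self-employed", "self-employed"), ("entrepreneur", "self-employed"), ("business owner", "self-employed"), ("employed", "employed"), ("working", "employed"), ("job holder", "employed")] := by rfl

theorem get?_canonicalIndex_none (x : String) (hx : x ∉ allSyn) : canonicalIndex.get? x = none := by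
  simp only [allSyn, List.mem_cons, List.not_mem_nil, or_false, not_or] at hx
  obtain ⟨h1, h2, h3, h4, h5, h6, h7, h8, h9, h10, h11, h12, h13, h14, h15⟩ := hx
  simp [canonicalIndex_mk, PySem.Dict.get?_mk_cons, get?_mk_nil_str,
    Ne.symm h1, Ne.symm h2, Ne.symm h3, Ne.symm h4, Ne.symm h5, Ne.symm h6, Ne.symm h7, Ne.symm h8, Ne.symm h9, Ne.symm h10, Ne.symm h11, Ne.symm h12, Ne.symm h13, Ne.symm h14, Ne.symm h15]

theorem get?_canonicalIndex_some (x v : String) (h : canonicalIndex.get? x = some v) :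
    (x, v) ∈ [("student", "student"), ("pupil", "student"), ("learner", "student"), ("farmer", "farmer"), ("agriculturist", "farmer"), ("cultivator", "farmer"), ("unemployed", "unemployed"), ("jobless", "unemployed"), ("seeking employment", "unemployed"), ("self-employed", "self-employed"), ("entrepreneur", "self-employed"), ("business owner", "self-employed"), ("employed", "employed"), ("working", "employed"), ("job holder", "employed")] := by
  by_cases hx : x ∈ allSyn
  · simp only [allSyn, List.mem_cons, List.not_mem_nil, or_false] at hx
    rcases hx with rfl|rfl|rfl|rfl|rfl|rfl|rfl|rfl|rfl|rfl|rfl|rfl|rfl|rfl|rfl <;>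
      simp_all [canonicalIndex_mk, PySem.Dict.get?_mk_cons]
  · rw [get?_canonicalIndex_none x hx] at h; cases h

theorem synLoop_eq (u c : String) :
    synLoop u c occupationSynonyms =
      (if canonicalIndex.get? u = some c ∨ canonicalIndex.get? c = some u then
        (true, "occupation " ++ u ++ " matches " ++ c ++ " criteria")
      else
        (false, "occupation " ++ u ++ " does not match required occupation: " ++ c)) := by
  simp only [synLoop, occupationSynonyms]
  by_cases hA0 : c = "student" ∧ u ∈ ["student", "pupil", "learner"]
  · rw [if_pos hA0]
    obtain ⟨rfl, hm⟩ := hA0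
    simp only [List.mem_cons, List.not_mem_nil, or_false] at hm
    rcases hm with rfl|rfl|rfl <;>
      simp [show canonicalIndex.get? "student" = some "student" from rfl, show canonicalIndex.get? "pupil" = some "student" from rfl, show canonicalIndex.get? "learner" = some "student" from rfl]
  rw [if_neg hA0]
  by_cases hB0 : u = "student" ∧ c ∈ ["student", "pupil", "learner"]
  · rw [if_pos hB0]
    obtain ⟨rfl, hm⟩ := hB0
    simp only [List.mem_cons, List.not_mem_nil, or_false] at hm
    rcases hm with rfl|rfl|rfl <;>
      simp [show canonicalIndex.get? "student" = some "student" from rfl, show canonicalIndex.get? "pupil" = some "student" from rfl, show canonicalIndex.get? "learner" = some "student" from rfl]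
  rw [if_neg hB0]
  by_cases hA1 : c = "farmer" ∧ u ∈ ["farmer", "agriculturist", "cultivator"]
  · rw [if_pos hA1]
    obtain ⟨rfl, hm⟩ := hA1
    simp only [List.mem_cons, List.not_mem_nil, or_false] at hm
    rcases hm with rfl|rfl|rfl <;>
      simp [show canonicalIndex.get? "farmer" = some "farmer" from rfl, show canonicalIndex.get? "agriculturist" = some "farmer" from rfl, show canonicalIndex.get? "cultivator" = some "farmer" from rfl]
  rw [if_neg hA1]
  by_cases hB1 : u = "farmer" ∧ c ∈ ["farmer", "agriculturist", "cultivator"]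
  · rw [if_pos hB1]
    obtain ⟨rfl, hm⟩ := hB1
    simp only [List.mem_cons, List.not_mem_nil, or_false] at hm
    rcases hm with rfl|rfl|rfl <;>
      simp [show canonicalIndex.get? "farmer" = some "farmer" from rfl, show canonicalIndex.get? "agriculturist" = some "farmer" from rfl, show canonicalIndex.get? "cultivator" = some "farmer" from rfl]
  rw [if_neg hB1]
  by_cases hA2 : c = "unemployed" ∧ u ∈ ["unemployed", "jobless", "seeking employment"]
  · rw [if_pos hA2]
    obtain ⟨rfl, hm⟩ := hA2
    simp only [List.mem_cons, List.not_mem_nil, or_false] at hm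
    rcases hm with rfl|rfl|rfl <;>
      simp [show canonicalIndex.get? "unemployed" = some "unemployed" from rfl, show canonicalIndex.get? "jobless" = some "unemployed" from rfl, show canonicalIndex.get? "seeking employment" = some "unemployed" from rfl]
  rw [if_neg hA2]
  by_cases hB2 : u = "unemployed" ∧ c ∈ ["unemployed", "jobless", "seeking employment"]
  · rw [if_pos hB2]
    obtain ⟨rfl, hm⟩ := hB2
    simp only [List.mem_cons, List.not_mem_nil, or_false] at hm
    rcases hm with rfl|rfl|rfl <;>
      simp [show canonicalIndex.get? "unemployed" = some "unemployed" from rfl, show canonicalIndex.get? "jobless" = some "unemployed" from rfl, show canonicalIndex.get? "seeking employment" = some "unemployed" from rfl]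
  rw [if_neg hB2]
  by_cases hA3 : c = "self-employed" ∧ u ∈ ["self-employed", "entrepreneur", "business owner"]
  · rw [if_pos hA3]
    obtain ⟨rfl, hm⟩ := hA3
    simp only [List.mem_cons, List.not_mem_nil, or_false] at hm
    rcases hm with rfl|rfl|rfl <;>
      simp [show canonicalIndex.get? "self-employed" = some "self-employed" from rfl, show canonicalIndex.get? "entrepreneur" = some "self-employed" from rfl, show canonicalIndex.get? "business owner" = some "self-employed" from rfl]
  rw [if_neg hA3]
  by_cases hB3 : u = "self-employed" ∧ c ∈ ["self-employed", "entrepreneur", "business owner"]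
  · rw [if_pos hB3]
    obtain ⟨rfl, hm⟩ := hB3
    simp only [List.mem_cons, List.not_mem_nil, or_false] at hm
    rcases hm with rfl|rfl|rfl <;>
      simp [show canonicalIndex.get? "self-employed" = some "self-employed" from rfl, show canonicalIndex.get? "entrepreneur" = some "self-employed" from rfl, show canonicalIndex.get? "business owner" = some "self-employed" from rfl]
  rw [if_neg hB3]
  by_cases hA4 : c = "employed" ∧ u ∈ ["employed", "working", "job holder"]
  · rw [if_pos hA4]
    obtain ⟨rfl, hm⟩ := hA4
    simp only [List.mem_cons, List.not_mem_nil, or_false] at hm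
    rcases hm with rfl|rfl|rfl <;>
      simp [show canonicalIndex.get? "employed" = some "employed" from rfl, show canonicalIndex.get? "working" = some "employed" from rfl, show canonicalIndex.get? "job holder" = some "employed" from rfl]
  rw [if_neg hA4]
  by_cases hB4 : u = "employed" ∧ c ∈ ["employed", "working", "job holder"]
  · rw [if_pos hB4]
    obtain ⟨rfl, hm⟩ := hB4
    simp only [List.mem_cons, List.not_mem_nil, or_false] at hm
    rcases hm with rfl|rfl|rfl <;>
      simp [show canonicalIndex.get? "employed" = some "employed" from rfl, show canonicalIndex.get? "working" = some "employed" from rfl, show canonicalIndex.get? "job holder" = some "employed" from rfl]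
  rw [if_neg hB4]
  rw [if_neg]
  rintro (hx | hx)
  · have hp := get?_canonicalIndex_some _ _ hx
    simp only [List.mem_cons, List.not_mem_nil, or_false, Prod.mk.injEq] at hp
    rcases hp with ⟨rfl, rfl⟩|⟨rfl, rfl⟩|⟨rfl, rfl⟩|⟨rfl, rfl⟩|⟨rfl, rfl⟩|⟨rfl, rfl⟩|⟨rfl, rfl⟩|⟨rfl, rfl⟩|⟨rfl, rfl⟩|⟨rfl, rfl⟩|⟨rfl, rfl⟩|⟨rfl, rfl⟩|⟨rfl, rfl⟩|⟨rfl, rfl⟩|⟨rfl, rfl⟩ <;> simp_all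
  · have hp := get?_canonicalIndex_some _ _ hx
    simp only [List.mem_cons, List.not_mem_nil, or_false, Prod.mk.injEq] at hp
    rcases hp with ⟨rfl, rfl⟩|⟨rfl, rfl⟩|⟨rfl, rfl⟩|⟨rfl, rfl⟩|⟨rfl, rfl⟩|⟨rfl, rfl⟩|⟨rfl, rfl⟩|⟨rfl, rfl⟩|⟨rfl, rfl⟩|⟨rfl, rfl⟩|⟨rfl, rfl⟩|⟨rfl, rfl⟩|⟨rfl, rfl⟩|⟨rfl, rfl⟩|⟨rfl, rfl⟩ <;> simp_all

-- ===== VERDICT (by name: the statement is the Claim_ definition above) =====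
theorem check_occupation_eligibility_spec : Claim_equal_check_occupation_eligibility := by
  intro u c _
  show check_occupation_eligibility u c = check_occupation_eligibility_alt u c
  unfold check_occupation_eligibility check_occupation_eligibility_alt
  simp only [synLoop_eq]
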